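-- pv_equiv track=rewrite | github.com/jk-jung/problem-solving | codewars/6kyu/6_Pair items from two lists of different lengths.py | pair_items
-- ===== SOURCE A (Python) =====
-- from itertools import combinations
--
-- def pair_items(a, b):
--     ck = False
--     if len(a) > len(b):
--         a, b = b, a
--         ck = True
--
--     r = []
--     for t in combinations(b, len(a)):
--         if ck:
--             r.append(list(zip(t, a)))
--         else:
--             r.append(list(zip(a, t)))
--     return r
-- ===== SOURCE B (Python) =====
-- def pair_items(a, b):
--     # Combinatorial number system: compute total = C(n, k) arithmetically, then
--     # UNRANK each r in range(total) directly into the r-th lexicographic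
--     # combination, instead of enumerating combinations.
--     swap = len(a) > len(b)
--     short, long_ = (b, a) if swap else (a, b)
--     n, k = len(long_), len(short)
--
--     def C(n, k):
--         if k < 0 or k > n:
--             return 0
--         k = min(k, n - k)
--         r = 1
--         for i in range(k):
--             r = r * (n - i) // (i + 1)
--         return r
--
--     def pick(k, r):
--         # the r-th (lexicographic) k-combination of long_, by rank arithmetic
--         out = []
--         i = 0
--         while i < n and 0 < k:
--             c = C(n - i - 1, k - 1)
--             if r < c:
--                 out.append(long_[i])
--                 k -= 1
--             else:
--                 r -= c
--             i += 1
--         return out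
--
--     return [list(zip(pick(k, r), short)) if swap
--             else list(zip(short, pick(k, r)))
--             for r in range(C(n, k))]
-- ===== Notes on version B (the rewrite author's own statement) =====
-- stated objective: alternative
-- what changed: Replaces enumeration via itertools.combinations with rank arithmetic in the combinatorial number system: B computes C(n,k) by a multiplicative formula and unranks each r in range(C(n,k)) directly into the r-th lexicographic combination by comparing the rank against binomial counts.
import Mathlib
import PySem

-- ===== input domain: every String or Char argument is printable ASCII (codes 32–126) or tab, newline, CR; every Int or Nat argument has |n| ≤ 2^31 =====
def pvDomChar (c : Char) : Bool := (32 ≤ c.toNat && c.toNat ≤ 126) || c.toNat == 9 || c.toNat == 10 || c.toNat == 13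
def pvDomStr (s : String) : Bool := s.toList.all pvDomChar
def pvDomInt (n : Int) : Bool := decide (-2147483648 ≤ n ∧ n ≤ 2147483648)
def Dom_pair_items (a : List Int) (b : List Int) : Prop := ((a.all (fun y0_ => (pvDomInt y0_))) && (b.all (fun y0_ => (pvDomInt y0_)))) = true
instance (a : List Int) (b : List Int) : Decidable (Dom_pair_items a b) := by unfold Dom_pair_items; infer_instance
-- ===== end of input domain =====

-- B replaces enumeration via itertools.combinations by rank arithmetic in the combinatorial
-- number system: it computes C(n,k) multiplicatively and unranks each r in range(C(n,k))
-- into the r-th lexicographic combination (objective: alternative algorithm, same cost class).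

-- ===== PORT A =====
-- itertools.combinations(b, k) in lexicographic (increasing-index) order, ported as the
-- standard take/skip recursion, which yields exactly itertools' order.
def pvCombA (xs : List Int) (k : Nat) : List (List Int) :=
  match k, xs with
  | 0, _ => [[]]
  | _ + 1, [] => []
  | k' + 1, x :: rest => (pvCombA rest k').map (fun c => x :: c) ++ pvCombA rest (k' + 1)

def pair_items (a : List Int) (b : List Int) : List (List (Int × Int)) :=
  -- ck = False; if len(a) > len(b): a, b = b, a; ck = True
  let s := if a.length > b.length then (b, a, true) else (a, b, false)
  let a := s.1; let b := s.2.1; let ck := s.2.2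
  -- r = []; for t in combinations(b, len(a)): r.append(zip …)
  (pvCombA b a.length).foldl
    (fun r t => r ++ [if ck then t.zip a else a.zip t]) []

-- ===== PORT B =====
-- def C(n, k): if k < 0 or k > n: return 0
--              k = min(k, n - k)
--              r = 1
--              for i in range(k): r = r * (n - i) // (i + 1)
--              return r
def pvC (n : Int) (k : Int) : Int :=
  if k < 0 ∨ n < k then 0
  else
    let k := min k (n - k)
    (PySem.List.pyRange 0 k 1).foldl
      (fun r i => PySem.Int.floordiv (r * (n - i)) (i + 1)) 1

-- def pick(k, r): out = []; i = 0
--                 while i < n and 0 < k: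
--                     c = C(n - i - 1, k - 1)
--                     if r < c: out.append(long_[i]); k -= 1
--                     else: r -= c
--                     i += 1
--                 return out
-- The scan over i walks long_ left to right, so it is rendered as recursion on the
-- remaining suffix of long_ (i < n ↔ the suffix is nonempty; n - i - 1 = len(suffix) - 1).
def pvPickGo : List Int → Int → Int → List Int → List Int
  | [], _, _, out => out
  | x :: rest, k, r, out =>
    if 0 < k then
      let c := pvC ((rest.length : Int)) (k - 1)
      if r < c then pvPickGo rest (k - 1) r (out ++ [x])
      else pvPickGo rest k (r - c) out
    else out

def pair_items_alt (a : List Int) (b : List Int) : List (List (Int × Int)) :=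
  -- swap = len(a) > len(b); short, long_ = (b, a) if swap else (a, b); n, k = len(long_), len(short)
  let swap := a.length > b.length
  let short := if swap then b else a
  let long := if swap then a else b
  let n := (long.length : Int)
  let k := (short.length : Int)
  -- [zip(pick(k, r), short) if swap else zip(short, pick(k, r)) for r in range(C(n, k))]
  (PySem.List.pyRange 0 (pvC n k) 1).map
    (fun r => if swap then (pvPickGo long k r []).zip short else short.zip (pvPickGo long k r []))

-- ===== PRECONDITION & SPEC =====
def Spec_pair_items (a : List Int) (b : List Int) (out : List (List (Int × Int))) : Prop := out = pair_items_alt a b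
instance (a : List Int) (b : List Int) (out : List (List (Int × Int))) : Decidable (Spec_pair_items a b out) := by unfold Spec_pair_items; infer_instance

-- ===== CLAIM (what is proved, stated in full; the proofs are below) =====
def Claim_equal_pair_items : Prop := ∀ (a : List Int) (b : List Int), Dom_pair_items a b → Spec_pair_items a b (pair_items a b)

-- ===== LEMMAS AND PROOFS =====

-- B's multiplicative loop maintains the invariant r = C(n, i)
theorem pvC_loop (n : Nat) : ∀ (k : Nat), k ≤ n →
    (List.range k).foldl
      (fun r (i : Nat) => PySem.Int.floordiv (r * ((n : Int) - (i : Int))) ((i : Int) + 1)) 1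
      = (n.choose k : Int) := by
  intro k
  induction k with
  | zero => intro _; simp
  | succ k' ih =>
    intro hkn
    rw [List.range_succ, List.foldl_append, ih (by omega)]
    have hc : (n.choose k' : Int) * ((n : Int) - (k' : Int))
        = ((n.choose (k' + 1) * (k' + 1) : Nat) : Int) := by
      rw [Nat.choose_succ_right_eq]
      push_cast [Nat.cast_sub (by omega : k' ≤ n)]
      ring
    simp only [List.foldl_cons, List.foldl_nil, hc]
    rw [show ((k' : Int) + 1) = (((k' + 1 : Nat)) : Int) by omega,
        PySem.Int.floordiv_natCast, Nat.mul_div_cancel _ (by omega)]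

-- B's C computes the binomial coefficient (the min uses choose's symmetry)
theorem pvC_natCast (n k : Nat) : pvC (n : Int) (k : Int) = (n.choose k : Int) := by
  unfold pvC
  by_cases h : (n : Int) < (k : Int)
  · rw [if_pos (Or.inr h), Nat.choose_eq_zero_of_lt (by exact_mod_cast h)]
    rfl
  · have hkn : k ≤ n := by exact_mod_cast not_lt.mp h
    rw [if_neg (by omega)]
    show (PySem.List.pyRange 0 (min (k : Int) ((n : Int) - (k : Int))) 1).foldl
      (fun r i => PySem.Int.floordiv (r * ((n : Int) - i)) (i + 1)) 1 = (n.choose k : Int)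
    rw [show min (k : Int) ((n : Int) - (k : Int)) = ((min k (n - k) : Nat) : Int) by
          push_cast [Nat.cast_sub hkn]; omega,
        PySem.List.pyRange_zero_natCast, List.foldl_map, pvC_loop n _ (by omega)]
    rcases le_or_gt k (n - k) with hm | hm
    · rw [min_eq_left hm]
    · rw [min_eq_right (by omega), Nat.choose_symm hkn]

-- unranking every rank in order reproduces the lexicographic combination list
theorem unrank_eq (xs : List Int) : ∀ (k : Nat) (out : List Int),
    (List.range (xs.length.choose k)).map (fun r : Nat => pvPickGo xs (k : Int) (r : Int) out)
      = (pvCombA xs k).map (fun c => out ++ c) := by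
  induction xs with
  | nil =>
    intro k out
    cases k with
    | zero => simp [pvPickGo, pvCombA]
    | succ k' => rfl
  | cons x rest ih =>
    intro k out
    cases k with
    | zero => simp [pvPickGo, pvCombA]
    | succ k' =>
      have hlen : (x :: rest).length = rest.length + 1 := rfl
      rw [hlen, Nat.choose_succ_succ, List.range_add, List.map_append]
      show _ ++ _ = ((pvCombA rest k').map (fun c => x :: c) ++ pvCombA rest (k' + 1)).map _
      rw [List.map_append]
      have h2 : (((k' + 1 : Nat)) : Int) - 1 = ((k' : Nat) : Int) := by omega
      congr 1
      · -- ranks below C(len rest, k') pick x then unrank the remainder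
        rw [List.map_map,
            show ((fun c => out ++ c) ∘ fun c : List Int => x :: c)
              = (fun c => (out ++ [x]) ++ c) from by funext c; simp,
            ← ih k' (out ++ [x])]
        apply List.map_congr_left
        intro r hr
        have hrlt : r < rest.length.choose k' := List.mem_range.mp hr
        show pvPickGo (x :: rest) ((k' + 1 : Nat) : Int) (r : Int) out = _
        simp only [pvPickGo]
        rw [if_pos (by omega), h2, pvC_natCast, if_pos (by exact_mod_cast hrlt)]
      · -- ranks at or above it unrank within the tail at the same length
        rw [← ih (k' + 1) out, List.map_map]
        apply List.map_congr_left
        intro r _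
        show pvPickGo (x :: rest) ((k' + 1 : Nat) : Int) ((rest.length.choose k' + r : Nat) : Int) out = _
        simp only [pvPickGo]
        rw [if_pos (by omega), h2, pvC_natCast, if_neg (by push_cast; omega)]
        congr 1
        push_cast
        ring

-- ===== VERDICT (by name: the statement is the Claim_ definition above) =====
theorem pair_items_spec : Claim_equal_pair_items := by
  intro a b _
  show pair_items a b = pair_items_alt a b
  unfold pair_items pair_items_alt
  by_cases h : a.length > b.length <;>
    simp only [h, if_true, if_false, PySem.List.foldl_append_singleton_eq_map,
      List.nil_append] <;>
    rw [pvC_natCast, PySem.List.pyRange_zero_natCast, List.map_map] <;>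
    symm
  · rw [show ((fun r : Int => (pvPickGo a ((b.length : Nat) : Int) r []).zip b) ∘ fun k : Nat => (k : Int))
          = ((fun t : List Int => t.zip b) ∘ (fun r : Nat => pvPickGo a ((b.length : Nat) : Int) (r : Int) [])) from rfl,
        ← List.map_map, unrank_eq a b.length [], List.map_map]
    apply List.map_congr_left
    intro c _
    simp
  · rw [show ((fun r : Int => a.zip (pvPickGo b ((a.length : Nat) : Int) r [])) ∘ fun k : Nat => (k : Int))
          = ((fun t : List Int => a.zip t) ∘ (fun r : Nat => pvPickGo b ((a.length : Nat) : Int) (r : Int) [])) from rfl,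
        ← List.map_map, unrank_eq b a.length [], List.map_map]
    apply List.map_congr_left
    intro c _
    simp
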